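-- pv_equiv track=rewrite | github.com/josephtingiris/vscode-gigachad-keybindings | keybindings-sort.py | object_has_trailing_comma
-- ===== SOURCE A (Python) =====
-- def object_has_trailing_comma(obj_text: str) -> bool:
--     lines = obj_text.rstrip().splitlines()
--     found_closing = False
--     for line in reversed(lines):
--         stripped = line.strip()
--         if not stripped:
--             continue
--         if not found_closing and stripped.endswith('}'):  # first closing brace
--             found_closing = True
--             continue
--         if found_closing:
--             # Only allow whitespace or comments after closing brace
--             if stripped.startswith(','):
--                 return True
--             elif stripped and not stripped.startswith('//') and not stripped.startswith('/*'):
--                 return False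
--     return False
-- ===== SOURCE B (Python) =====
-- def object_has_trailing_comma(obj_text: str) -> bool:
--     ans = False
--     prev = None
--     for raw in obj_text.rstrip().splitlines():
--         line = raw.strip()
--         if not line:
--             continue
--         if line.endswith('}'):
--             ans = prev is not None and prev.startswith(',')
--         if not (line.startswith('//') or line.startswith('/*')):
--             prev = line
--     return ans
-- ===== Notes on version B (the rewrite author's own statement) =====
-- stated objective: alternative
-- what changed: A scans the lines in reverse with a found_closing flag and early returns; B makes a single forward pass tracking the answer-so-far and the last non-comment non-blank line, so the closing-brace search and the back-scan disappear.
import Mathlib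
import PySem

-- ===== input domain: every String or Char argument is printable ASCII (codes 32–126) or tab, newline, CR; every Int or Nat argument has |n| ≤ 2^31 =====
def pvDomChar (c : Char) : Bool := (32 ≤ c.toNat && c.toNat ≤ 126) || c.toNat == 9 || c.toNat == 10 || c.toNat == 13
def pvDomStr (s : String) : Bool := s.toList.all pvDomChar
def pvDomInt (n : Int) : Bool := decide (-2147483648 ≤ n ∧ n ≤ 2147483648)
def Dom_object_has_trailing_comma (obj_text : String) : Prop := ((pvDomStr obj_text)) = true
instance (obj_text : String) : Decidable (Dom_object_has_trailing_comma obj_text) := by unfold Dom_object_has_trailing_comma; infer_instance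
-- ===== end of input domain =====

-- B replaces A's reversed scan with a found_closing flag and early returns by a single
-- forward pass tracking the last non-comment line seen (objective: alternative decomposition).

-- ===== PORT A =====
-- loop state: (found_closing, early-return value); a `some` return value is absorbing,
-- mirroring Python's early `return` inside the loop.
def pvAStep (st : Bool × Option Bool) (line : String) : Bool × Option Bool :=
  match st.2 with
  | some _ => st
  | none =>
    let stripped := PySem.Str.strip line
    if stripped = "" then st
    else if !st.1 && PySem.Str.endswith stripped "}" then (true, none)
    else if st.1 then
      if PySem.Str.startswith stripped "," then (st.1, some true)
      else if !(stripped = "") && !PySem.Str.startswith stripped "//"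
              && !PySem.Str.startswith stripped "/*" then (st.1, some false)
      else st
    else st

def object_has_trailing_comma (obj_text : String) : Bool :=
  let lines := PySem.Str.splitlines (PySem.Str.rstrip obj_text)
  ((lines.reverse.foldl pvAStep (false, none)).2).getD false

-- ===== PORT B =====
-- loop state: (answer so far, last non-comment non-blank stripped line seen so far)
def pvBStep (st : Bool × Option String) (raw : String) : Bool × Option String :=
  let line := PySem.Str.strip raw
  if line = "" then st
  else
    let ans := if PySem.Str.endswith line "}" then
                 (match st.2 with
                  | some p => PySem.Str.startswith p ","
                  | none => false)
               else st.1
    let prev := if !(PySem.Str.startswith line "//" || PySem.Str.startswith line "/*") then some line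
                else st.2
    (ans, prev)

def object_has_trailing_comma_alt (obj_text : String) : Bool :=
  ((PySem.Str.splitlines (PySem.Str.rstrip obj_text)).foldl pvBStep (false, none)).1

-- ===== PRECONDITION & SPEC =====
def Spec_object_has_trailing_comma (obj_text : String) (out : Bool) : Prop := out = object_has_trailing_comma_alt obj_text
instance (obj_text : String) (out : Bool) : Decidable (Spec_object_has_trailing_comma obj_text out) := by unfold Spec_object_has_trailing_comma; infer_instance

-- ===== CLAIM (what is proved, stated in full; the proofs are below) =====
def Claim_equal_object_has_trailing_comma : Prop := ∀ (obj_text : String), Dom_object_has_trailing_comma obj_text → Spec_object_has_trailing_comma obj_text (object_has_trailing_comma obj_text)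

-- ===== LEMMAS AND PROOFS =====

-- comment test on an already-stripped line
def pvIsComment (s : String) : Bool :=
  PySem.Str.startswith s "//" || PySem.Str.startswith s "/*"

-- the two loop bodies on an already-stripped line (pvAStep/pvBStep strip first, then
-- behave as these; see pvAStep_eq / pvBStep_eq)
def pvACore (st : Bool × Option Bool) (s : String) : Bool × Option Bool :=
  match st.2 with
  | some _ => st
  | none =>
    if s = "" then st
    else if !st.1 && PySem.Str.endswith s "}" then (true, none)
    else if st.1 then
      if PySem.Str.startswith s "," then (st.1, some true)
      else if !(s = "") && !PySem.Str.startswith s "//"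
              && !PySem.Str.startswith s "/*" then (st.1, some false)
      else st
    else st

def pvBCore (st : Bool × Option String) (s : String) : Bool × Option String :=
  if s = "" then st
  else
    let ans := if PySem.Str.endswith s "}" then
                 (match st.2 with
                  | some p => PySem.Str.startswith p ","
                  | none => false)
               else st.1
    let prev := if !(PySem.Str.startswith s "//" || PySem.Str.startswith s "/*") then some s
                else st.2
    (ans, prev)

theorem pvAStep_eq (st : Bool × Option Bool) (raw : String) :
    pvAStep st raw = pvACore st (PySem.Str.strip raw) := rfl

theorem pvBStep_eq (st : Bool × Option String) (raw : String) :
    pvBStep st raw = pvBCore st (PySem.Str.strip raw) := rfl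

-- A's phase-2 scan (upwards from the closing brace), on already-stripped nonempty lines
def pvScanBack : List String → Bool
  | [] => false
  | y :: ys =>
    if PySem.Str.startswith y "," then true
    else if pvIsComment y then pvScanBack ys
    else false

-- B's `prev` component as a function of the (already-stripped, nonempty) line list
def pvLastNC (p : Option String) : List String → Option String
  | [] => p
  | x :: xs => pvLastNC (if pvIsComment x then p else some x) xs

def pvOptComma : Option String → Bool
  | some p => PySem.Str.startswith p ","
  | none => false

theorem pvACore_empty (st : Bool × Option Bool) : pvACore st "" = st := by
  rcases st with ⟨f, r⟩; cases r <;> simp [pvACore]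

theorem pvBCore_empty (st : Bool × Option String) : pvBCore st "" = st := by
  simp [pvBCore]

-- a line starting with "//" or "/*" does not start with ","
theorem pvComment_not_comma (s : String) (h : pvIsComment s = true) :
    PySem.Chars.startswith s.toList [','] = false := by
  simp only [pvIsComment, Bool.or_eq_true] at h
  have h' : ∃ c, c ≠ ',' ∧ [c] <+: s.toList := by
    rcases h with h | h <;> simp at h <;>
      rw [PySem.Chars.startswith_iff] at h
    · exact ⟨'/', by decide, List.IsPrefix.trans ⟨['/'], rfl⟩ h⟩
    · exact ⟨'/', by decide, List.IsPrefix.trans ⟨['*'], rfl⟩ h⟩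
  rcases h' with ⟨c, hc, hpre⟩
  rw [Bool.eq_false_iff]
  intro hcomma
  rw [PySem.Chars.startswith_iff] at hcomma
  rcases hpre with ⟨t1, ht1⟩
  rcases hcomma with ⟨t2, ht2⟩
  rw [← ht1] at ht2
  simp only [List.cons_append, List.nil_append] at ht2
  injection ht2 with h1 _
  exact hc h1.symm

-- A's fold over the raw lines equals the core fold over the stripped nonblank lines
theorem pvAFold_eq (L : List String) (st : Bool × Option Bool) :
    L.foldl pvAStep st
      = ((L.map PySem.Str.strip).filter (· ≠ "")).foldl pvACore st := by
  induction L generalizing st with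
  | nil => rfl
  | cons x L ih =>
    simp only [List.foldl_cons, List.map_cons, List.filter_cons, pvAStep_eq]
    by_cases hx : PySem.Str.strip x = ""
    · simp [hx, pvACore_empty, ih]
    · simp [hx, ih]

theorem pvBFold_eq (L : List String) (st : Bool × Option String) :
    L.foldl pvBStep st
      = ((L.map PySem.Str.strip).filter (· ≠ "")).foldl pvBCore st := by
  induction L generalizing st with
  | nil => rfl
  | cons x L ih =>
    simp only [List.foldl_cons, List.map_cons, List.filter_cons, pvBStep_eq]
    by_cases hx : PySem.Str.strip x = ""
    · simp [hx, pvBCore_empty, ih]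
    · simp [hx, ih]

-- the early-return state is absorbing
theorem pvAFold_absorb (l : List String) (f b : Bool) :
    l.foldl pvACore (f, some b) = (f, some b) := by
  induction l with
  | nil => rfl
  | cons x l ih => simpa [pvACore] using ih

-- phase 2 of A: from the found_closing state the fold computes pvScanBack
theorem pvAFold_found (l : List String) (hne : ∀ x ∈ l, x ≠ "") :
    ((l.foldl pvACore (true, none)).2).getD false = pvScanBack l := by
  induction l with
  | nil => rfl
  | cons y l ih =>
    have hy : y ≠ "" := hne y (by simp)
    have hrest : ∀ x ∈ l, x ≠ "" := fun x hx => hne x (by simp [hx])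
    simp only [List.foldl_cons]
    by_cases hc : PySem.Chars.startswith y.toList [','] = true
    · have hstep : pvACore (true, none) y = (true, some true) := by
        simp [pvACore, hy, hc]
      rw [hstep, pvAFold_absorb]
      simp [pvScanBack, hc]
    · by_cases h1 : PySem.Chars.startswith y.toList ['/', '/'] = true
      · have hstep : pvACore (true, none) y = (true, none) := by
          simp [pvACore, hy, hc, h1]
        rw [hstep, ih hrest]
        simp [pvScanBack, pvIsComment, hc, h1]
      · by_cases h2 : PySem.Chars.startswith y.toList ['/', '*'] = true
        · have hstep : pvACore (true, none) y = (true, none) := by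
            simp [pvACore, hy, hc, h1, h2]
          rw [hstep, ih hrest]
          simp [pvScanBack, pvIsComment, hc, h1, h2]
        · have hstep : pvACore (true, none) y = (true, some false) := by
            simp [pvACore, hy, hc, h1, h2]
          rw [hstep, pvAFold_absorb]
          simp [pvScanBack, pvIsComment, hc, h1, h2]

-- B's prev component is pvLastNC, independently of the answer component
theorem pvBFold_snd (l : List String) (hne : ∀ x ∈ l, x ≠ "") (a : Bool) (p : Option String) :
    (l.foldl pvBCore (a, p)).2 = pvLastNC p l := by
  induction l generalizing a p with
  | nil => rfl
  | cons x l ih =>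
    have hx : x ≠ "" := hne x (by simp)
    have hrest : ∀ y ∈ l, y ≠ "" := fun y hy => hne y (by simp [hy])
    simp only [List.foldl_cons, pvLastNC]
    have key : ∀ (q : Option String), (pvBCore (a, p) x).2 = q →
        (List.foldl pvBCore (pvBCore (a, p) x) l).2 = pvLastNC q l := by
      intro q hq
      have heq : pvBCore (a, p) x = ((pvBCore (a, p) x).1, q) := Prod.ext rfl hq
      rw [heq, ih hrest]
    by_cases hcm : pvIsComment x = true
    · rw [if_pos hcm]
      apply key p
      simp only [pvIsComment, Bool.or_eq_true] at hcm
      rcases hcm with h | h <;> simp at h <;> simp [pvBCore, hx, h]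
    · rw [if_neg hcm]
      apply key (some x)
      have h1 : ¬ PySem.Chars.startswith x.toList ['/', '/'] = true :=
        fun h => hcm (by simp [pvIsComment, h])
      have h2 : ¬ PySem.Chars.startswith x.toList ['/', '*'] = true :=
        fun h => hcm (by simp [pvIsComment, h])
      simp [pvBCore, hx, h1, h2]

theorem pvLastNC_append (u : List String) (y : String) (p : Option String) :
    pvLastNC p (u ++ [y]) = if pvIsComment y then pvLastNC p u else some y := by
  induction u generalizing p with
  | nil => simp [pvLastNC]
  | cons x u ih => simp [pvLastNC, ih]

-- A's back-scan from the closing brace equals the comma test on B's last non-comment line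
theorem pvScan_lastNC (u : List String) :
    pvScanBack u.reverse = pvOptComma (pvLastNC none u) := by
  induction u using List.reverseRecOn with
  | nil => rfl
  | append_singleton u y ih =>
    rw [List.reverse_append, pvLastNC_append]
    by_cases hcm : pvIsComment y = true
    · have hnc := pvComment_not_comma y hcm
      rw [if_pos hcm]
      simp [pvScanBack, hnc, hcm, ih]
    · rw [if_neg hcm]
      by_cases hc : PySem.Chars.startswith y.toList [','] = true <;>
        simp [pvScanBack, pvOptComma, hcm, hc]

-- main induction: A's reversed-scan result equals B's forward-pass answer
theorem pvMain (t : List String) (hne : ∀ x ∈ t, x ≠ "") :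
    ((t.reverse.foldl pvACore (false, none)).2).getD false
      = (t.foldl pvBCore (false, none)).1 := by
  induction t using List.reverseRecOn with
  | nil => rfl
  | append_singleton u x ih =>
    have hx : x ≠ "" := hne x (by simp)
    have hu : ∀ y ∈ u, y ≠ "" := fun y hy => hne y (by simp [hy])
    have hur : ∀ y ∈ u.reverse, y ≠ "" := fun y hy => hu y (List.mem_reverse.mp hy)
    rw [List.reverse_append, List.foldl_append]
    by_cases hb : PySem.Chars.endswith x.toList ['}'] = true
    · have hstep : pvACore (false, none) x = (true, none) := by
        simp [pvACore, hx, hb]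
      simp only [List.reverse_singleton, List.foldl_cons, List.foldl_nil, hstep]
      rw [pvAFold_found u.reverse hur, pvScan_lastNC]
      have hsnd := pvBFold_snd u hu false none
      rw [← hsnd]
      have hgoal : (pvBCore (List.foldl pvBCore (false, none) u) x).1
          = pvOptComma (List.foldl pvBCore (false, none) u).2 := by
        cases hq : (List.foldl pvBCore (false, none) u).2 <;>
          simp [pvBCore, hx, hb, hq, pvOptComma]
      rw [List.foldl_append, List.foldl_cons, List.foldl_nil, hgoal]
    · have hstep : pvACore (false, none) x = (false, none) := by
        simp [pvACore, hx, hb]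
      simp only [List.reverse_singleton, List.foldl_cons, List.foldl_nil, hstep]
      rw [ih hu]
      simp [pvBCore, hx, hb]

-- ===== VERDICT (by name: the statement is the Claim_ definition above) =====
theorem object_has_trailing_comma_spec : Claim_equal_object_has_trailing_comma := by
  intro obj_text _
  unfold Spec_object_has_trailing_comma object_has_trailing_comma object_has_trailing_comma_alt
  show ((List.foldl pvAStep (false, none)
          (PySem.Str.splitlines (PySem.Str.rstrip obj_text)).reverse).2).getD false
      = (List.foldl pvBStep (false, none)
          (PySem.Str.splitlines (PySem.Str.rstrip obj_text))).1
  rw [pvAFold_eq, pvBFold_eq]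
  rw [show ((PySem.Str.splitlines (PySem.Str.rstrip obj_text)).reverse.map
        PySem.Str.strip).filter (· ≠ "")
      = (((PySem.Str.splitlines (PySem.Str.rstrip obj_text)).map
          PySem.Str.strip).filter (· ≠ "")).reverse from by
    simp [List.map_reverse, List.filter_reverse]]
  exact pvMain _ (fun x hx => by simpa using List.of_mem_filter hx)
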